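-- pv_equiv track=rewrite | github.com/MING9UCCI/CodingTest_Python | 프로그래머스/0/181931. 등차수열의 특정한 항만 더하기/등차수열의 특정한 항만 더하기.py | solution
-- ===== SOURCE A (Python) =====
-- def solution(a, d, included):
--     sum = 0
--     for i in range(len(included)):
--         if i == 0:
--             if included[i] == True:
--                 sum += a
--         else:
--             if included[i] == True:
--                 a += d
--                 sum += a
--             else:
--                 a += d
--     return sum
-- ===== SOURCE B (Python) =====
-- def solution(a, d, included):
--     return sum(a + i * d for i, inc in enumerate(included) if inc == True)
-- ===== Notes on version B (the rewrite author's own statement) =====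
-- stated objective: simpler
-- what changed: Replaces A's stateful loop that threads a mutated running term and a special-cased i==0 branch with a direct closed-form sum over enumerate: each selected term is computed as a + i*d, eliminating the accumulator/branch structure.
import Mathlib
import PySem

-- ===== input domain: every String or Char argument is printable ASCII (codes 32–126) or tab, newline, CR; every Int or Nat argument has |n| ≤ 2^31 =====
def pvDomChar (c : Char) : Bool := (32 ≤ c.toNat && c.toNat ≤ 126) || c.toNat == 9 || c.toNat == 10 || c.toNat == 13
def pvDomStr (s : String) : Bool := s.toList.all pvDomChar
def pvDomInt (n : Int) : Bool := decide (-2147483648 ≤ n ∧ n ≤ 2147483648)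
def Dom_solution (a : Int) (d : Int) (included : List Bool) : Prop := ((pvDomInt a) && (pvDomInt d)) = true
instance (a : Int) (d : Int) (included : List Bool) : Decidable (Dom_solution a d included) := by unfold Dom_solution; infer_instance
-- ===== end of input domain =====

-- B replaces A's stateful loop (running term mutated each step, special-cased i == 0)
-- by a direct closed-form sum a + i*d over the selected indices; objective: simpler.


-- ===== PORT A =====
-- loop body of A: state (sum, a), one iteration for index i with element x = included[i]
def solBodyA (d : Int) (st : Int × Int) (p : Int × Bool) : Int × Int :=
  if p.1 == 0 then
    (if p.2 == true then (st.1 + st.2, st.2) else st)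
  else
    (if p.2 == true then (st.1 + (st.2 + d), st.2 + d) else (st.1, st.2 + d))

def solution (a : Int) (d : Int) (included : List Bool) : Int :=
  ((PySem.List.pyRange 0 included.length 1).foldl
    (fun st i => solBodyA d st (i, PySem.List.pyGetD included i false)) (0, a)).1

-- ===== PORT B =====
def solution_alt (a : Int) (d : Int) (included : List Bool) : Int :=
  ((PySem.List.enumerate included 0).filter (fun p => p.2 == true)).foldl
    (fun s p => s + (a + p.1 * d)) 0

-- ===== PRECONDITION & SPEC =====
def Spec_solution (a : Int) (d : Int) (included : List Bool) (out : Int) : Prop := out = solution_alt a d included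
instance (a : Int) (d : Int) (included : List Bool) (out : Int) : Decidable (Spec_solution a d included out) := by unfold Spec_solution; infer_instance

-- ===== CLAIM (what is proved, stated in full; the proofs are below) =====
def Claim_equal_solution : Prop := ∀ (a : Int) (d : Int) (included : List Bool), Dom_solution a d included → Spec_solution a d included (solution a d included)

-- ===== LEMMAS AND PROOFS =====

lemma foldl_plus_eq_sum_map {α : Type} (f : α → Int) :
    ∀ (l : List α) (c : Int), l.foldl (fun acc x => acc + f x) c = c + (l.map f).sum := by
  intro l
  induction l with
  | nil => intro c; simp
  | cons x xs ih => intro c; simp [List.foldl_cons, ih]; ring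

lemma solBodyA_zero_false (d : Int) (st : Int × Int) : solBodyA d st (0, false) = st := by
  simp [solBodyA]

lemma solBodyA_zero_true (d : Int) (st : Int × Int) :
    solBodyA d st (0, true) = (st.1 + st.2, st.2) := by
  simp [solBodyA]

lemma solBodyA_pos_false (d : Int) (st : Int × Int) (s : Int) (hs : 1 ≤ s) :
    solBodyA d st (s, false) = (st.1, st.2 + d) := by
  have : (s == 0) = false := by simp; omega
  simp [solBodyA, this]

lemma solBodyA_pos_true (d : Int) (st : Int × Int) (s : Int) (hs : 1 ≤ s) :
    solBodyA d st (s, true) = (st.1 + (st.2 + d), st.2 + d) := by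
  have : (s == 0) = false := by simp; omega
  simp [solBodyA, this]

-- shifting the base term by d is the same as shifting the index offset by one
lemma sum_map_shift (d a s : Int) (l : List (Int × Bool)) :
    (l.map (fun p => a + d + (p.1 - (s + 1) + 1) * d)).sum =
      (l.map (fun p => a + (p.1 - s + 1) * d)).sum := by
  rw [List.map_congr_left (g := fun p : Int × Bool => a + (p.1 - s + 1) * d)
    (by intro p _; ring)]

-- invariant for A's loop on the tail (indices s ≥ 1): the running term advances by d each
-- step, so the selected term at index i contributes a + (i - s + 1) * d
lemma solBodyA_tail (d : Int) :
    ∀ (xs : List Bool) (s sum a : Int), 1 ≤ s →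
      (PySem.List.enumerate xs s).foldl (solBodyA d) (sum, a) =
        (sum + (((PySem.List.enumerate xs s).filter (fun p => p.2 == true)).map
                  (fun p => a + (p.1 - s + 1) * d)).sum,
         a + xs.length * d) := by
  intro xs
  induction xs with
  | nil => intro s sum a hs; simp [PySem.List.enumerate_nil]
  | cons x t ih =>
    intro s sum a hs
    rw [PySem.List.enumerate_cons, List.foldl_cons]
    cases x with
    | false =>
      rw [solBodyA_pos_false d _ s hs, ih (s+1) sum (a+d) (by omega)]
      rw [List.filter_cons, if_neg (by simp)]
      simp only [Prod.mk.injEq]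
      exact ⟨by rw [sum_map_shift], by push_cast [List.length_cons]; ring⟩
    | true =>
      rw [solBodyA_pos_true d _ s hs, ih (s+1) (sum + (a+d)) (a+d) (by omega)]
      rw [List.filter_cons, if_pos (by rfl)]
      simp only [Prod.mk.injEq, List.map_cons, List.sum_cons]
      refine ⟨?_, by push_cast [List.length_cons]; ring⟩
      rw [sum_map_shift]; ring

theorem solution_eq_alt (a d : Int) (included : List Bool) :
    solution a d included = solution_alt a d included := by
  unfold solution solution_alt
  have h1 : PySem.List.enumerate included 0 =
      (PySem.List.pyRange 0 (included.length : Int) 1).map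
        (fun j => (j, PySem.List.pyGetD included j false)) := by
    rw [PySem.List.enumerate_eq_map_pyRange (d := false)]
    norm_num [PySem.List.len_eq]
  have h2 : (PySem.List.enumerate included 0).foldl (solBodyA d) ((0 : Int), a) =
      (PySem.List.pyRange 0 (included.length : Int) 1).foldl
        (fun st i => solBodyA d st (i, PySem.List.pyGetD included i false)) (0, a) := by
    rw [h1, List.foldl_map]
  rw [← h2, foldl_plus_eq_sum_map]
  cases included with
  | nil => simp [PySem.List.enumerate_nil]
  | cons x t =>
    rw [PySem.List.enumerate_cons, List.foldl_cons]
    simp only [zero_add]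
    cases x with
    | false =>
      rw [solBodyA_zero_false, solBodyA_tail d t 1 0 a (by omega)]
      rw [List.filter_cons, if_neg (by simp)]
      dsimp only
      rw [List.map_congr_left (g := fun p : Int × Bool => a + p.1 * d) (by intro p _; ring)]
      ring
    | true =>
      rw [solBodyA_zero_true, solBodyA_tail d t 1 (0 + a) a (by omega)]
      rw [List.filter_cons, if_pos (by rfl)]
      dsimp only
      simp only [List.map_cons, List.sum_cons]
      rw [List.map_congr_left (g := fun p : Int × Bool => a + p.1 * d) (by intro p _; ring)]
      ring

-- ===== VERDICT (by name: the statement is the Claim_ definition above) =====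
theorem solution_spec : Claim_equal_solution := by
  intro a d included _
  unfold Spec_solution
  exact solution_eq_alt a d included
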